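-- pv_equiv track=rewrite | github.com/miemie2013/miemienet | gen_code.py | elem_get_index
-- ===== SOURCE A (Python) =====
-- def elem_get_index(d, D, shape):
--     real_shape = []
--     real_i = []
--     p = 0
--     for s in shape:
--         if s != '1':
--             real_shape.append(D[p])
--             real_i.append(d[p])
--         p += 1
--     if len(real_shape) == 4:
--         _index = '((%s * %s + %s) * %s + %s) * %s + %s' % (real_i[0], real_shape[1], real_i[1], real_shape[2], real_i[2], real_shape[3], real_i[3])
--     elif len(real_shape) == 3:
--         _index = '(%s * %s + %s) * %s + %s' % (real_i[0], real_shape[1], real_i[1], real_shape[2], real_i[2])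
--     elif len(real_shape) == 2:
--         _index = '%s * %s + %s' % (real_i[0], real_shape[1], real_i[1])
--     elif len(real_shape) == 1:
--         _index = '%s' % (real_i[0], )
--     elif len(real_shape) == 0:
--         _index = '0'
--     return _index
-- ===== SOURCE B (Python) =====
-- def elem_get_index(d, D, shape):
--     real = [(d[p], D[p]) for p, s in enumerate(shape) if s != '1']
--     if not real:
--         return '0'
--     _index = real[0][0]
--     for k in range(1, len(real)):
--         xi, Sk = real[k]
--         left = _index if k == 1 else '(%s)' % (_index,)
--         _index = '%s * %s + %s' % (left, Sk, xi)
--     return _index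
-- ===== Notes on version B (the rewrite author's own statement) =====
-- stated objective: simpler
-- what changed: Replaces A's four unrolled length-specific format branches by a single Horner accumulator loop over the filtered (index, dim) pairs, with the base cases '0' / first index.
-- crash fix: On inputs whose shape has 5 or more non-'1' entries (with indices in range) A raises UnboundLocalError because its if-chain never binds _index; B returns the Horner expression extended in the same parenthesisation pattern. — e.g. on elem_get_index(["a", "b", "c", "x", "e"], ["A", "B", "C", "X", "E"], ["2", "2", "2", "2", "2"]): A raises UnboundLocalError, B returns "(((a * B + b) * C + c) * X + x) * E + e"
import Mathlib
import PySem

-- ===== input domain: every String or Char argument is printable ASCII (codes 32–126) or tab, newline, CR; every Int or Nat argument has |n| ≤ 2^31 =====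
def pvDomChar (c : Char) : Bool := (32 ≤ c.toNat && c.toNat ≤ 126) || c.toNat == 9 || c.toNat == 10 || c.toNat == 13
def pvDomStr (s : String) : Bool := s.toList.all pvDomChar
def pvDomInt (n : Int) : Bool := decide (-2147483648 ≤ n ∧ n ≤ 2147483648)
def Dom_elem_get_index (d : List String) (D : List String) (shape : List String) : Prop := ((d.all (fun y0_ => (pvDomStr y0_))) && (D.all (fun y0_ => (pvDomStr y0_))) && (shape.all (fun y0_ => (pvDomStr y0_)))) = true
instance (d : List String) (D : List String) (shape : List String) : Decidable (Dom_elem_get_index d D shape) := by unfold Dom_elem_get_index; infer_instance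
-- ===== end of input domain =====

-- B replaces A's four unrolled length-branches by a single Horner accumulator loop over the
-- filtered (index, dim) pairs; objective: simpler (and it returns the natural value for 5+
-- real dimensions, where A raises UnboundLocalError — see Raises_ block).

-- shared subscript helper: xs[i] (Python semantics; the default is never used inside Pre_)
def pvIdx (xs : List String) (i : Int) : String := (PySem.List.pyGet? xs i).getD ""

-- ===== PORT A =====
def elem_get_index (d : List String) (D : List String) (shape : List String) : String :=
  -- the for-loop building real_shape, real_i while incrementing p
  let st := shape.foldl
    (fun (acc : List String × List String × Int) s =>
      if s ≠ "1" then (acc.1 ++ [pvIdx D acc.2.2], acc.2.1 ++ [pvIdx d acc.2.2], acc.2.2 + 1)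
      else (acc.1, acc.2.1, acc.2.2 + 1))
    ([], [], 0)
  let real_shape := st.1
  let real_i := st.2.1
  if real_shape.length == 4 then
    "((" ++ pvIdx real_i 0 ++ " * " ++ pvIdx real_shape 1 ++ " + " ++ pvIdx real_i 1 ++ ") * "
      ++ pvIdx real_shape 2 ++ " + " ++ pvIdx real_i 2 ++ ") * " ++ pvIdx real_shape 3 ++ " + " ++ pvIdx real_i 3
  else if real_shape.length == 3 then
    "(" ++ pvIdx real_i 0 ++ " * " ++ pvIdx real_shape 1 ++ " + " ++ pvIdx real_i 1 ++ ") * "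
      ++ pvIdx real_shape 2 ++ " + " ++ pvIdx real_i 2
  else if real_shape.length == 2 then
    pvIdx real_i 0 ++ " * " ++ pvIdx real_shape 1 ++ " + " ++ pvIdx real_i 1
  else if real_shape.length == 1 then
    pvIdx real_i 0
  else if real_shape.length == 0 then
    "0"
  else
    ""  -- len(real_shape) >= 5: Python A raises UnboundLocalError here; excluded by Pre_

-- ===== PORT B =====
-- the comprehension: (d[p], D[p]) for each non-'1' entry of shape
def pvPairF (d : List String) (D : List String) (q : Int × String) : Option (String × String) :=
  if q.2 ≠ "1" then some (pvIdx d q.1, pvIdx D q.1) else none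

def elem_get_index_alt (d : List String) (D : List String) (shape : List String) : String :=
  let real := (PySem.List.enumerate shape 0).filterMap (pvPairF d D)
  match real with
  | [] => "0"
  | first :: rest =>
    -- for k in range(1, len(real)): fold over the remaining pairs with the counter k
    (rest.foldl
      (fun (acc : String × Nat) pr =>
        let left := if acc.2 == 1 then acc.1 else "(" ++ acc.1 ++ ")"
        (left ++ " * " ++ pr.2 ++ " + " ++ pr.1, acc.2 + 1))
      (first.1, 1)).1

-- ===== PRECONDITION & SPEC =====
-- Pre_ excludes exactly the inputs where Python A raises: an IndexError when a non-'1' entry of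
-- shape has no matching element in d or D, and the UnboundLocalError when five or more entries
-- of shape are non-'1' (A's if-chain binds _index only for 0..4 of them).
def Pre_elem_get_index (d : List String) (D : List String) (shape : List String) : Prop :=
  shape.countP (fun s => !(s == "1")) ≤ 4 ∧
  ∀ q ∈ PySem.List.enumerate shape 0, q.2 ≠ "1" → q.1 < (d.length : Int) ∧ q.1 < (D.length : Int)
instance (d : List String) (D : List String) (shape : List String) : Decidable (Pre_elem_get_index d D shape) := by unfold Pre_elem_get_index; infer_instance

def pvWitness_elem_get_index : List String × List String × List String := (["i0", "i1"], ["S0", "S1"], ["2", "3"])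

-- On inputs whose shape has ≥ 5 non-'1' entries (indices in range) A raises UnboundLocalError; B returns the Horner expression extended in the same pattern.
def Raises_elem_get_index (d : List String) (D : List String) (shape : List String) : Prop :=
  5 ≤ shape.countP (fun s => !(s == "1")) ∧
  ∀ q ∈ PySem.List.enumerate shape 0, q.2 ≠ "1" → q.1 < (d.length : Int) ∧ q.1 < (D.length : Int)
instance (d : List String) (D : List String) (shape : List String) : Decidable (Raises_elem_get_index d D shape) := by unfold Raises_elem_get_index; infer_instance
def pvRaiseWitness_elem_get_index : List String × List String × List String :=
  (["a", "b", "c", "x", "e"], ["A", "B", "C", "X", "E"], ["2", "2", "2", "2", "2"])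
def pvRaiseWitnessOut_elem_get_index : String := "(((a * B + b) * C + c) * X + x) * E + e"

def Spec_elem_get_index (d : List String) (D : List String) (shape : List String) (out : String) : Prop := out = elem_get_index_alt d D shape
instance (d : List String) (D : List String) (shape : List String) (out : String) : Decidable (Spec_elem_get_index d D shape out) := by unfold Spec_elem_get_index; infer_instance

-- ===== CLAIM (what is proved, stated in full; the proofs are below) =====
def Claim_equal_elem_get_index : Prop := ∀ (d : List String) (D : List String) (shape : List String), Dom_elem_get_index d D shape → Pre_elem_get_index d D shape → Spec_elem_get_index d D shape (elem_get_index d D shape)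
def Claim_raises_elem_get_index : Prop := (∀ (d : List String) (D : List String) (shape : List String), Dom_elem_get_index d D shape → Raises_elem_get_index d D shape → ¬ Pre_elem_get_index d D shape) ∧ (Dom_elem_get_index (pvRaiseWitness_elem_get_index.1) (pvRaiseWitness_elem_get_index.2.1) (pvRaiseWitness_elem_get_index.2.2) ∧ Raises_elem_get_index (pvRaiseWitness_elem_get_index.1) (pvRaiseWitness_elem_get_index.2.1) (pvRaiseWitness_elem_get_index.2.2) ∧ elem_get_index_alt (pvRaiseWitness_elem_get_index.1) (pvRaiseWitness_elem_get_index.2.1) (pvRaiseWitness_elem_get_index.2.2) = pvRaiseWitnessOut_elem_get_index)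

-- ===== LEMMAS AND PROOFS =====

-- A's loop state, characterised: real_shape / real_i are the second/first components of B's pairs
lemma foldA_eq (d D : List String) : ∀ (shape rs ri : List String) (p : Int),
    shape.foldl
      (fun (acc : List String × List String × Int) s =>
        if s ≠ "1" then (acc.1 ++ [pvIdx D acc.2.2], acc.2.1 ++ [pvIdx d acc.2.2], acc.2.2 + 1)
        else (acc.1, acc.2.1, acc.2.2 + 1))
      (rs, ri, p)
    = (rs ++ ((PySem.List.enumerate shape p).filterMap (pvPairF d D)).map Prod.snd,
       ri ++ ((PySem.List.enumerate shape p).filterMap (pvPairF d D)).map Prod.fst,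
       p + shape.length) := by
  intro shape
  induction shape with
  | nil => intro rs ri p; simp [PySem.List.enumerate_nil]
  | cons s t ih =>
    intro rs ri p
    rw [PySem.List.enumerate_cons, List.filterMap_cons]
    by_cases hs : s = "1"
    · rw [show pvPairF d D (p, s) = none from by simp [pvPairF, hs]]
      simp only [List.foldl_cons, if_neg (by simp [hs] : ¬ s ≠ "1")]
      rw [ih]
      simp only [List.length_cons, Prod.mk.injEq]
      refine ⟨by simp, by simp, by push_cast; ring⟩
    · rw [show pvPairF d D (p, s) = some (pvIdx d p, pvIdx D p) from by simp [pvPairF, hs]]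
      simp only [List.foldl_cons, if_pos hs]
      rw [ih]
      simp only [List.map_cons, List.append_assoc, List.singleton_append, List.length_cons, Prod.mk.injEq]
      refine ⟨by simp, by simp, by push_cast; ring⟩

lemma length_real (d D : List String) : ∀ (shape : List String) (p : Int),
    ((PySem.List.enumerate shape p).filterMap (pvPairF d D)).length
      = shape.countP (fun s => !(s == "1")) := by
  intro shape
  induction shape with
  | nil => intro p; simp [PySem.List.enumerate_nil]
  | cons s t ih =>
    intro p
    rw [PySem.List.enumerate_cons, List.filterMap_cons]
    by_cases hs : s = "1"
    · rw [show pvPairF d D (p, s) = none from by simp [pvPairF, hs]]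
      simp [ih, hs]
    · rw [show pvPairF d D (p, s) = some (pvIdx d p, pvIdx D p) from by simp [pvPairF, hs]]
      simp [ih, hs]

lemma toList_eq_imp {s t : String} (h : s.toList = t.toList) : s = t :=
  String.toList_inj.mp h

theorem elem_get_index_spec : Claim_equal_elem_get_index := by
  intro d D shape _ hpre
  obtain ⟨hlen, _⟩ := hpre
  unfold Spec_elem_get_index elem_get_index elem_get_index_alt
  rw [foldA_eq]
  simp only [List.nil_append]
  have hL : ((PySem.List.enumerate shape 0).filterMap (pvPairF d D)).length
      = shape.countP (fun s => !(s == "1")) := length_real d D shape 0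
  set L := (PySem.List.enumerate shape 0).filterMap (pvPairF d D) with hLdef
  have hlenL : L.length ≤ 4 := by omega
  clear hL hLdef hlen
  match L, hlenL with
  | [], _ => simp
  | [a], _ => simp [pvIdx, PySem.List.pyGet?, PySem.List.pyIdx?]
  | [a, b], _ =>
      simp only [List.map_cons, List.map_nil, List.length_cons, List.length_nil, List.foldl]
      norm_num [pvIdx, PySem.List.pyGet?, PySem.List.pyIdx?]
  | [a, b, c], _ =>
      simp only [List.map_cons, List.map_nil, List.length_cons, List.length_nil, List.foldl]
      norm_num [pvIdx, PySem.List.pyGet?, PySem.List.pyIdx?]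
      apply toList_eq_imp
      simp [String.append_assoc]
  | [a, b, c, e], _ =>
      simp only [List.map_cons, List.map_nil, List.length_cons, List.length_nil, List.foldl]
      norm_num [pvIdx, PySem.List.pyGet?, PySem.List.pyIdx?]
      apply toList_eq_imp
      simp [String.append_assoc]

@[simp]
theorem elem_get_index_raises : Claim_raises_elem_get_index := by
  unfold Claim_raises_elem_get_index
  refine ⟨?_, by decide⟩
  intro d D shape _ hr hpre
  have h5 := hr.1
  have h4 := hpre.1
  omega
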